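-- pv_equiv track=rewrite | github.com/baditaflorin/ServerClaw | platform/runtime_assurance/declared_live_attestation.py | active_bindings
-- ===== SOURCE A (Python) =====
-- from typing import Any
--
-- def active_bindings(service: dict[str, Any], requested_environment: str | None) -> list[tuple[str, dict[str, Any]]]:
--     environments = service.get("environments")
--     if not isinstance(environments, dict):
--         return []
--     bindings: list[tuple[str, dict[str, Any]]] = []
--     for environment, binding in environments.items():
--         if requested_environment and environment != requested_environment:
--             continue
--         if not isinstance(binding, dict):
--             continue
--         if binding.get("status") != "active":
--             continue
--         bindings.append((environment, binding))
--     return bindings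
-- ===== SOURCE B (Python) =====
-- from typing import Any
--
-- def active_bindings(service: dict[str, Any], requested_environment: str | None) -> list[tuple[str, dict[str, Any]]]:
--     environments = service.get("environments")
--     if not isinstance(environments, dict):
--         return []
--     if requested_environment:
--         binding = environments.get(requested_environment)
--         if isinstance(binding, dict) and binding.get("status") == "active":
--             return [(requested_environment, binding)]
--         return []
--     return [(environment, binding) for environment, binding in environments.items()
--             if isinstance(binding, dict) and binding.get("status") == "active"]
-- ===== Notes on version B (the rewrite author's own statement) =====
-- stated objective: alternative
-- what changed: Instead of one loop over all environments that filters by name and status, B branches: a truthy requested_environment becomes a single direct dict lookup (no scan), and only the falsy case keeps a comprehension over the items.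
import Mathlib
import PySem

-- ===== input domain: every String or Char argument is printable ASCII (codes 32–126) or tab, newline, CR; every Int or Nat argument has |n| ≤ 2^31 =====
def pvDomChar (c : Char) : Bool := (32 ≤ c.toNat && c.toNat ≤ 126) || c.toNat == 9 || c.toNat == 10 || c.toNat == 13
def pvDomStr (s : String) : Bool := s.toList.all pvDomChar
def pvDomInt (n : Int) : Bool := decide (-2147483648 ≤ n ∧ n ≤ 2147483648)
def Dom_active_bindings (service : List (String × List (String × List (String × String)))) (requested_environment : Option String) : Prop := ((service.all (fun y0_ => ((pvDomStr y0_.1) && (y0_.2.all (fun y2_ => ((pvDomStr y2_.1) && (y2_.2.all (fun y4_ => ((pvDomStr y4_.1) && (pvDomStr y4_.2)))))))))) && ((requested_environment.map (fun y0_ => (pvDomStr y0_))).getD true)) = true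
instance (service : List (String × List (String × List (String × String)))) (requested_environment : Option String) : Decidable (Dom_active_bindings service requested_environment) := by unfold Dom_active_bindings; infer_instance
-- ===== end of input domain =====

-- B replaces A's unconditional scan by a direct dict lookup when an environment is requested (alternative decomposition; return value only).

-- ===== PORT A =====
def active_bindings (service : List (String × List (String × List (String × String)))) (requested_environment : Option String) : List (String × (List (String × String))) :=
  match (PySem.Dict.mk service).get? "environments" with
  | none => []
  | some environments =>
      environments.foldl
        (fun bindings eb =>
          -- if requested_environment and environment != requested_environment: continue
          if (match requested_environment with
              | some r => decide (r ≠ "") && (eb.1 != r)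
              | none => false) then bindings
          -- if binding.get("status") != "active": continue
          else if (PySem.Dict.mk eb.2).get? "status" != some "active" then bindings
          else bindings ++ [eb]) []

-- ===== PORT B =====
-- the falsy branch: collect items whose binding has status == "active"
def pvActiveAll (envs : List (String × List (String × String))) : List (String × List (String × String)) :=
  envs.filter (fun eb => (PySem.Dict.mk eb.2).get? "status" == some "active")

def active_bindings_alt (service : List (String × List (String × List (String × String)))) (requested_environment : Option String) : List (String × (List (String × String))) :=
  match (PySem.Dict.mk service).get? "environments" with
  | none => []
  | some environments =>
      match requested_environment with
      | some r =>
          if r ≠ "" then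
            match (PySem.Dict.mk environments).get? r with
            | some binding =>
                if (PySem.Dict.mk binding).get? "status" = some "active" then [(r, binding)] else []
            | none => []
          else pvActiveAll environments
      | none => pvActiveAll environments

-- ===== PRECONDITION & SPEC =====
-- Pre_ excludes association lists whose environments carry duplicate keys: such lists denote no Python dict
-- (dict construction collapses duplicates), and first-vs-last-match behaviour there is anybody's choice.
def Pre_active_bindings (service : List (String × List (String × List (String × String)))) (requested_environment : Option String) : Prop :=
  ((((PySem.Dict.mk service).get? "environments").getD []).map Prod.fst).Nodup
instance (service : List (String × List (String × List (String × String)))) (requested_environment : Option String) : Decidable (Pre_active_bindings service requested_environment) := by unfold Pre_active_bindings; infer_instance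

def pvWitness_active_bindings : (List (String × List (String × List (String × String)))) × Option String :=
  ([("environments", [("prod", [("status", "active")]), ("dev", [("status", "off")])])], some "prod")

def Spec_active_bindings (service : List (String × List (String × List (String × String)))) (requested_environment : Option String) (out : List (String × (List (String × String)))) : Prop := out = active_bindings_alt service requested_environment
instance (service : List (String × List (String × List (String × String)))) (requested_environment : Option String) (out : List (String × (List (String × String)))) : Decidable (Spec_active_bindings service requested_environment out) := by unfold Spec_active_bindings; infer_instance

-- ===== CLAIM (what is proved, stated in full; the proofs are below) =====
def Claim_equal_active_bindings : Prop := ∀ (service : List (String × List (String × List (String × String)))) (requested_environment : Option String), Dom_active_bindings service requested_environment → Pre_active_bindings service requested_environment → Spec_active_bindings service requested_environment (active_bindings service requested_environment)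

-- ===== LEMMAS AND PROOFS =====

-- A's loop with a vacuous name filter is the status filter (the falsy branch).
lemma foldl_status_filter (envs : List (String × List (String × String)))
    (acc : List (String × List (String × String))) :
    envs.foldl
      (fun bindings eb =>
        if (PySem.Dict.mk eb.2).get? "status" != some "active" then bindings
        else bindings ++ [eb]) acc = acc ++ pvActiveAll envs := by
  induction envs generalizing acc with
  | nil => simp [pvActiveAll]
  | cons e rest ih =>
      rw [List.foldl_cons]
      by_cases h : (PySem.Dict.mk e.2).get? "status" = some "active"
      · rw [if_neg (by simp [h]), ih]
        simp [pvActiveAll, h]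
      · rw [if_pos (by simp [h]), ih]
        simp [pvActiveAll, h]

-- A loop over entries none of which carries the requested key leaves the accumulator unchanged.
lemma foldl_no_key (r : String) (envs : List (String × List (String × String)))
    (hmem : ∀ eb ∈ envs, eb.1 ≠ r)
    (acc : List (String × List (String × String))) :
    envs.foldl
      (fun bindings eb =>
        if eb.1 != r then bindings
        else if (PySem.Dict.mk eb.2).get? "status" != some "active" then bindings
        else bindings ++ [eb]) acc = acc := by
  induction envs generalizing acc with
  | nil => rfl
  | cons e rest ih =>
      have h1 : e.1 ≠ r := hmem e (List.mem_cons_self ..)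
      rw [List.foldl_cons, if_pos (by simp [h1])]
      exact ih (fun eb hb => hmem eb (List.mem_cons_of_mem _ hb)) acc

-- A's loop for a requested environment is B's direct lookup (needs distinct keys).
lemma foldl_lookup (r : String) (envs : List (String × List (String × String)))
    (hnd : (envs.map Prod.fst).Nodup) :
    envs.foldl
      (fun bindings eb =>
        if eb.1 != r then bindings
        else if (PySem.Dict.mk eb.2).get? "status" != some "active" then bindings
        else bindings ++ [eb]) [] =
    (match (PySem.Dict.mk envs).get? r with
     | some binding =>
         if (PySem.Dict.mk binding).get? "status" = some "active" then [(r, binding)] else []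
     | none => []) := by
  induction envs with
  | nil => rfl
  | cons e rest ih =>
      obtain ⟨k, v⟩ := e
      simp only [List.map_cons, List.nodup_cons] at hnd
      rw [List.foldl_cons]
      by_cases hk : k = r
      · subst hk
        have hget : (PySem.Dict.mk ((k, v) :: rest)).get? k = some v := by
          rw [PySem.Dict.get?_mk_cons]; simp
        rw [hget, if_neg (by simp)]
        dsimp only
        have hrest : ∀ eb ∈ rest, eb.1 ≠ k := by
          intro eb hb hkey
          exact hnd.1 (hkey ▸ List.mem_map_of_mem hb)
        by_cases hs : (PySem.Dict.mk v).get? "status" = some "active"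
        · rw [if_neg (by simp [hs]), if_pos hs, List.nil_append]
          exact foldl_no_key k rest hrest [(k, v)]
        · rw [if_pos (by simp [hs]), if_neg hs]
          exact foldl_no_key k rest hrest []
      · have hget : (PySem.Dict.mk ((k, v) :: rest)).get? r = (PySem.Dict.mk rest).get? r := by
          rw [PySem.Dict.get?_mk_cons]; simp [hk]
        rw [hget, if_pos (by simp [hk])]
        exact ih hnd.2

-- ===== VERDICT (by name: the statement is the Claim_ definition above) =====
theorem active_bindings_spec : Claim_equal_active_bindings := by
  intro service requested_environment _hdom hpre
  unfold Spec_active_bindings active_bindings active_bindings_alt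
  unfold Pre_active_bindings at hpre
  cases henv : (PySem.Dict.mk service).get? "environments" with
  | none => rfl
  | some envs =>
      rw [henv] at hpre
      simp only [Option.getD_some] at hpre
      cases requested_environment with
      | none =>
          dsimp only
          simp only [Bool.false_eq_true, if_false]
          exact (foldl_status_filter envs []).trans (by simp)
      | some r =>
          by_cases hr : r = ""
          · subst hr
            dsimp only
            have hc : ∀ eb : String × List (String × String),
                (decide (("" : String) ≠ "") && (eb.1 != "")) = false := by
              intro eb; simp
            simp only [hc, Bool.false_eq_true, if_false]
            exact (foldl_status_filter envs []).trans (by simp)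
          · dsimp only
            have hc : ∀ eb : String × List (String × String),
                (decide (r ≠ "") && (eb.1 != r)) = (eb.1 != r) := by
              intro eb; simp [hr]
            simp only [hc]
            rw [if_pos hr]
            exact foldl_lookup r envs hpre
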